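-- pv_equiv track=rewrite | github.com/adeelahmad/mlx-grpo-trainer | src/mlx_rl_trainer/utils/text_utils.py | _indices_to_letters
-- ===== SOURCE A (Python) =====
-- import string
-- from typing import Any, Dict, List, Optional, Sequence, Set, Tuple, Callable, Union
--
-- LETTER_ALPH = string.ascii_uppercase
--
-- def _indices_to_letters(indices: List[int]) -> str:
--     """Converts a list of 0-based indices to comma-separated letters (e.g., [0, 2] -> 'A,C')."""
--     letters = [LETTER_ALPH[idx] for idx in indices if 0 <= idx < len(LETTER_ALPH)]
--     seen, out = set(), []
--     for L in sorted(letters):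
--         if L not in seen:
--             seen.add(L)
--             out.append(L)
--     return ",".join(out)
-- ===== SOURCE B (Python) =====
-- import string
--
-- LETTER_ALPH = string.ascii_uppercase
--
-- def _indices_to_letters(indices):
--     """Converts a list of 0-based indices to comma-separated letters (e.g., [0, 2] -> 'A,C')."""
--     present = {idx for idx in indices if 0 <= idx < len(LETTER_ALPH)}
--     return ",".join(LETTER_ALPH[i] for i in range(len(LETTER_ALPH)) if i in present)
-- ===== Notes on version B (the rewrite author's own statement) =====
-- stated objective: idiomatic
-- what changed: Replaces the comparison sort plus manual seen-set dedup with a presence set built in one pass and a single ordered scan of range(26), making sorting and deduplication implicit.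
import Mathlib
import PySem

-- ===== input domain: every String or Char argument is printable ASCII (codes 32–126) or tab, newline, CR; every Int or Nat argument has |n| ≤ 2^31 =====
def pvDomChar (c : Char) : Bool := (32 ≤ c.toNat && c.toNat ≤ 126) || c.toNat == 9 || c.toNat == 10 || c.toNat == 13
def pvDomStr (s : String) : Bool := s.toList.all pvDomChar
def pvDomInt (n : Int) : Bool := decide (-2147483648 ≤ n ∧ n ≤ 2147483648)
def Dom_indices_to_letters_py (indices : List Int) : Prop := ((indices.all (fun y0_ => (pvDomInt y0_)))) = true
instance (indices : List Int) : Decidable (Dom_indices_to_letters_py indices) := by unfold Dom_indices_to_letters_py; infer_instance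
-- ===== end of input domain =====

-- B replaces A's sort-then-dedup with a presence set and one ordered scan of the 26-letter alphabet (idiomatic; sorting and dedup become implicit).
-- Letters are modelled as Char (each LETTER_ALPH[i] is a length-1 str; Python's str order on them is the code-point order).

-- LETTER_ALPH = string.ascii_uppercase (module constant used by both versions)
def pvLetters : List Char := "ABCDEFGHIJKLMNOPQRSTUVWXYZ".toList

-- ===== PORT A =====
def indices_to_letters_py (indices : List Int) : String :=
  let letters := indices.filterMap (fun idx =>
    if 0 ≤ idx ∧ idx < (pvLetters.length : Int) then PySem.List.pyGet? pvLetters idx else none)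
  let out := ((PySem.List.sorted letters (fun L => L)).foldl
      (fun st L => if PySem.Set.contains st.1 L then st else (PySem.Set.add st.1 L, st.2 ++ [L]))
      (PySem.Set.empty, [])).2
  String.ofList (PySem.Chars.join [','] (out.map (fun L => [L])))

-- ===== PORT B =====
def indices_to_letters_py_alt (indices : List Int) : String :=
  let present : PySem.Set Int :=
    PySem.Set.ofList (indices.filter (fun idx => decide (0 ≤ idx ∧ idx < (pvLetters.length : Int))))
  let out := (PySem.List.pyRange 0 (pvLetters.length : Int)).filterMap (fun i =>
    if PySem.Set.contains present i then PySem.List.pyGet? pvLetters i else none)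
  String.ofList (PySem.Chars.join [','] (out.map (fun L => [L])))

-- ===== PRECONDITION & SPEC =====
def Spec_indices_to_letters_py (indices : List Int) (out : String) : Prop := out = indices_to_letters_py_alt indices
instance (indices : List Int) (out : String) : Decidable (Spec_indices_to_letters_py indices out) := by unfold Spec_indices_to_letters_py; infer_instance

-- ===== CLAIM (what is proved, stated in full; the proofs are below) =====
def Claim_equal_indices_to_letters_py : Prop := ∀ (indices : List Int), Dom_indices_to_letters_py indices → Spec_indices_to_letters_py indices (indices_to_letters_py indices)

-- ===== LEMMAS AND PROOFS =====

-- A's seen/out loop: both components stay equal and accumulate exactly foldl Set.add (= building set(...)).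
lemma pv_fold_eq_update (ys : List Char) (s : List Char) :
    ys.foldl (fun st L => if PySem.Set.contains st.1 L then st else (PySem.Set.add st.1 L, st.2 ++ [L]))
      (s, s) = (ys.foldl PySem.Set.add s, ys.foldl PySem.Set.add s) := by
  induction ys generalizing s with
  | nil => rfl
  | cons y ys ih =>
    have hstep : (if PySem.Set.contains s y then ((s : PySem.Set Char), s)
        else (PySem.Set.add s y, s ++ [y])) = (PySem.Set.add s y, PySem.Set.add s y) := by
      by_cases h : y ∈ s <;> simp [PySem.Set.add, PySem.Set.contains, h]
    show List.foldl _ (if PySem.Set.contains s y then (s, s) else (PySem.Set.add s y, s ++ [y])) ys = _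
    rw [hstep]
    exact ih (PySem.Set.add s y)

-- building a set by repeated add keeps a (first-occurrence) sub-sequence of what it is fed
lemma pv_foldl_add_sublist (ys : List Char) (s : List Char) :
    List.Sublist (ys.foldl PySem.Set.add s) (s ++ ys) := by
  induction ys generalizing s with
  | nil => simp
  | cons y ys ih =>
    refine (ih (PySem.Set.add s y)).trans ?_
    by_cases h : y ∈ s
    · have hs : PySem.Set.add s y = s := by simp [PySem.Set.add, PySem.Set.contains, h]
      rw [hs]
      exact List.Sublist.append_left (List.sublist_cons_self y ys) s
    · have hs : PySem.Set.add s y = s ++ [y] := by simp [PySem.Set.add, PySem.Set.contains, h]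
      rw [hs]
      simp

lemma pv_ofList_sublist (xs : List Char) : List.Sublist (PySem.Set.ofList xs) xs := by
  rw [PySem.Set.ofList_eq_foldl]
  simpa using pv_foldl_add_sublist xs []

-- the alphabet is strictly increasing
lemma pv_letters_pairwise : List.Pairwise (· < ·) pvLetters := by decide

lemma pv_pyGet?_some {xs : List Char} {i : Int} {c : Char} (h0 : 0 ≤ i)
    (h : PySem.List.pyGet? xs i = some c) : xs[i.toNat]? = some c := by
  rw [show i = ((i.toNat : Nat) : Int) by omega] at h
  rwa [PySem.List.pyGet?_natCast] at h

-- A's out-list equals sorted(set(letters))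
lemma pv_A_eq_sorted (letters : List Char) :
    (PySem.List.sorted letters (fun L => L)).foldl PySem.Set.add ([] : PySem.Set Char) =
      PySem.List.sorted (PySem.Set.ofList letters) (fun L => L) := by
  rw [← PySem.Set.ofList_eq_foldl]
  refine (PySem.List.sorted_eq_of_perm_of_pairwise_lt _ _ _ ?_ ?_).symm
  · rw [List.perm_ext_iff_of_nodup (PySem.Set.nodup_ofList _) (PySem.Set.nodup_ofList _)]
    intro a
    rw [PySem.Set.mem_ofList, PySem.Set.mem_ofList, PySem.List.mem_sorted]
  · have hle : List.Pairwise (fun a b : Char => a ≤ b)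
        (PySem.Set.ofList (PySem.List.sorted letters (fun L => L))) :=
      List.Pairwise.sublist (pv_ofList_sublist _) (PySem.List.sorted_pairwise letters (fun L => L))
    have hne : List.Pairwise (fun a b : Char => a ≠ b)
        (PySem.Set.ofList (PySem.List.sorted letters (fun L => L))) :=
      PySem.Set.nodup_ofList (PySem.List.sorted letters (fun L => L))
    exact (List.Pairwise.and hle hne).imp (fun h => lt_of_le_of_ne h.1 h.2)

theorem pv_main (indices : List Int) :
    indices_to_letters_py indices = indices_to_letters_py_alt indices := by
  simp only [indices_to_letters_py, indices_to_letters_py_alt]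
  apply congrArg
  apply congrArg
  apply congrArg
  set f : Int → Option Char := fun idx =>
    if 0 ≤ idx ∧ idx < (pvLetters.length : Int) then PySem.List.pyGet? pvLetters idx else none with hf
  set letters : List Char := indices.filterMap f with hlet
  set present : PySem.Set Int :=
    PySem.Set.ofList (indices.filter (fun idx => decide (0 ≤ idx ∧ idx < (pvLetters.length : Int)))) with hpres
  set g : Int → Option Char := fun i =>
    if PySem.Set.contains present i then PySem.List.pyGet? pvLetters i else none with hg
  have hcont : ∀ i : Int, PySem.Set.contains present i = true ↔
      (i ∈ indices ∧ (0 ≤ i ∧ i < (pvLetters.length : Int))) := by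
    intro i
    rw [hpres]
    simp [PySem.Set.contains, PySem.Set.mem_ofList, List.mem_filter]
  have hA : ((PySem.List.sorted letters (fun L => L)).foldl
      (fun st L => if PySem.Set.contains st.1 L then st else (PySem.Set.add st.1 L, st.2 ++ [L]))
      (PySem.Set.empty, [])).2 = PySem.List.sorted (PySem.Set.ofList letters) (fun L => L) := by
    rw [show (PySem.Set.empty, ([] : List Char)) = (([] : List Char), ([] : List Char)) from rfl,
      pv_fold_eq_update]
    exact pv_A_eq_sorted letters
  have hplB : List.Pairwise (fun a b : Char => a < b)
      ((PySem.List.pyRange 0 (pvLetters.length : Int)).filterMap g) := by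
    rw [List.pairwise_filterMap]
    have hbase : List.Pairwise (fun a b : Int => a < b)
        (PySem.List.pyRange 0 (pvLetters.length : Int)) := by decide
    refine List.Pairwise.imp_of_mem ?_ hbase
    intro a b ha hb hab x hx y hy
    rw [hg] at hx hy
    dsimp only at hx hy
    have hax : PySem.List.pyGet? pvLetters a = some x := by
      by_cases h : PySem.Set.contains present a
      · rwa [if_pos h] at hx
      · rw [if_neg h] at hx; exact absurd hx (by simp)
    have hby : PySem.List.pyGet? pvLetters b = some y := by
      by_cases h : PySem.Set.contains present b
      · rwa [if_pos h] at hy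
      · rw [if_neg h] at hy; exact absurd hy (by simp)
    have ha0 : 0 ≤ a := (PySem.List.mem_pyRange_one.mp ha).1
    have hb0 : 0 ≤ b := (PySem.List.mem_pyRange_one.mp hb).1
    have hax' := pv_pyGet?_some ha0 hax
    have hby' := pv_pyGet?_some hb0 hby
    have hal : a.toNat < pvLetters.length := by
      by_contra hc
      rw [List.getElem?_eq_none (by omega)] at hax'
      simp at hax'
    have hbl : b.toNat < pvLetters.length := by
      by_contra hc
      rw [List.getElem?_eq_none (by omega)] at hby'
      simp at hby'
    have hxe : x = pvLetters[a.toNat] := by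
      rw [List.getElem?_eq_getElem hal] at hax'; exact (Option.some.inj hax').symm
    have hye : y = pvLetters[b.toNat] := by
      rw [List.getElem?_eq_getElem hbl] at hby'; exact (Option.some.inj hby').symm
    rw [hxe, hye]
    exact List.pairwise_iff_getElem.mp pv_letters_pairwise _ _ hal hbl (by omega)
  have hB : (PySem.List.pyRange 0 (pvLetters.length : Int)).filterMap g =
      PySem.List.sorted (PySem.Set.ofList letters) (fun L => L) := by
    refine (PySem.List.sorted_eq_of_perm_of_pairwise_lt _ _ _ ?_ ?_).symm
    · have hndB : ((PySem.List.pyRange 0 (pvLetters.length : Int)).filterMap g).Nodup :=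
        hplB.imp (fun h => ne_of_lt h)
      rw [List.perm_ext_iff_of_nodup hndB (PySem.Set.nodup_ofList _)]
      intro c
      rw [PySem.Set.mem_ofList, hlet]
      simp only [List.mem_filterMap]
      constructor
      · rintro ⟨i, hi, hgi⟩
        rw [hg] at hgi
        dsimp only at hgi
        by_cases h : PySem.Set.contains present i
        · rw [if_pos h] at hgi
          obtain ⟨hmem, hgd⟩ := (hcont i).mp h
          exact ⟨i, hmem, by rw [hf]; dsimp only; rw [if_pos hgd]; exact hgi⟩
        · rw [if_neg h] at hgi; exact absurd hgi (by simp)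
      · rintro ⟨idx, hidx, hfi⟩
        rw [hf] at hfi
        dsimp only at hfi
        by_cases h : 0 ≤ idx ∧ idx < (pvLetters.length : Int)
        · rw [if_pos h] at hfi
          refine ⟨idx, PySem.List.mem_pyRange_one.mpr ⟨h.1, h.2⟩, ?_⟩
          rw [hg]
          dsimp only
          rw [if_pos ((hcont idx).mpr ⟨hidx, h⟩)]
          exact hfi
        · rw [if_neg h] at hfi; exact absurd hfi (by simp)
    · exact hplB
  rw [hA, hB]

-- ===== VERDICT (by name: the statement is the Claim_ definition above) =====
theorem indices_to_letters_py_spec : Claim_equal_indices_to_letters_py := by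
  intro indices _
  exact pv_main indices
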